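-- pv_equiv track=rewrite | github.com/Nithish34/squadra | backend/app/agents/analyst_agent/clusterer.py | cluster_gaps
-- ===== SOURCE A (Python) =====
-- def cluster_gaps(gaps: list[dict]) -> list[dict]:
--     """Group related gaps into macro opportunities."""
--     for gap in gaps:
--         cat = gap.get("category", "").lower()
--         opp_type = gap.get("opportunity_type", "").lower()
--
--         combined = cat + " " + opp_type
--
--         if "price" in combined or "cost" in combined:
--             gap["cluster"] = "Pricing Strategy Optimization"
--         elif "promo" in combined or "discount" in combined:
--             gap["cluster"] = "Aggressive Promotion Campaign"
--         elif "deliver" in combined or "convenience" in combined or "geo" in combined: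
--             gap["cluster"] = "Local Convenience Dominance"
--         elif "ux" in combined or "service" in combined:
--             gap["cluster"] = "Customer Experience Enhancement"
--         else:
--             gap["cluster"] = "Product & Brand Positioning"
--     return gaps
-- ===== SOURCE B (Python) =====
-- # Staged multi-pass rewrite: first a pass assigns every gap the default label,
-- # then one sweep over the whole gap list PER RULE, in reverse priority order,
-- # overwriting matching gaps' labels so the highest-priority match written last wins.
-- # Same in-place mutation and return value as the original single-pass if/elif chain.
-- _RULES = [
--     (("price", "cost"), "Pricing Strategy Optimization"),
--     (("promo", "discount"), "Aggressive Promotion Campaign"),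
--     (("deliver", "convenience", "geo"), "Local Convenience Dominance"),
--     (("ux", "service"), "Customer Experience Enhancement"),
-- ]
-- _DEFAULT = "Product & Brand Positioning"
--
-- def cluster_gaps(gaps: list[dict]) -> list[dict]:
--     combos = [gap.get("category", "").lower() + " " + gap.get("opportunity_type", "").lower()
--               for gap in gaps]
--     for gap in gaps:
--         gap["cluster"] = _DEFAULT
--     for kws, label in reversed(_RULES):
--         for gap, combined in zip(gaps, combos):
--             if any(kw in combined for kw in kws):
--                 gap["cluster"] = label
--     return gaps
-- ===== Notes on version B (the rewrite author's own statement) =====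
-- stated objective: alternative
-- what changed: Replaces the single pass with a per-gap if/elif chain by staged passes: one pass assigns the default label to every gap, then one full sweep over the gap list per rule in reverse priority order, overwriting labels so the last (highest-priority) write wins instead of the first match.
import Mathlib
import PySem

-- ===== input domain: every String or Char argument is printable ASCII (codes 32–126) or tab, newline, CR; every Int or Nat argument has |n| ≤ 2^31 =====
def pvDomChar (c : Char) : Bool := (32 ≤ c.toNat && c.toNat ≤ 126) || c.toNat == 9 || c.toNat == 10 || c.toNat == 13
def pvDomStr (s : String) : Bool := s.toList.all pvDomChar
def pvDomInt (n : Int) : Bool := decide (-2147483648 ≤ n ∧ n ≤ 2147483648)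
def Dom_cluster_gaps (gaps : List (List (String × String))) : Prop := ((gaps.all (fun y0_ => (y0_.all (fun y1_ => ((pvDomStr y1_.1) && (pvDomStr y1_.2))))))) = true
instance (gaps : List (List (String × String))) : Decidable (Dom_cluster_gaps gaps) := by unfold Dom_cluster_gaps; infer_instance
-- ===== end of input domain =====

-- B replaces A's single pass with a per-gap if/elif chain by staged passes:
-- default-label pass, then one sweep over all gaps per rule in reverse priority
-- order, overwriting labels (last write wins). Same in-place mutation and value.

-- ===== PORT A =====
def pvClusterA (gap : List (String × String)) : List (String × String) :=
  let d := PySem.Dict.mk gap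
  let cat := PySem.Str.lower (d.getD "category" "")
  let opp := PySem.Str.lower (d.getD "opportunity_type" "")
  let combined := cat ++ " " ++ opp
  if PySem.Str.isIn "price" combined || PySem.Str.isIn "cost" combined then
    (d.insert "cluster" "Pricing Strategy Optimization").items
  else if PySem.Str.isIn "promo" combined || PySem.Str.isIn "discount" combined then
    (d.insert "cluster" "Aggressive Promotion Campaign").items
  else if PySem.Str.isIn "deliver" combined || PySem.Str.isIn "convenience" combined
          || PySem.Str.isIn "geo" combined then
    (d.insert "cluster" "Local Convenience Dominance").items
  else if PySem.Str.isIn "ux" combined || PySem.Str.isIn "service" combined then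
    (d.insert "cluster" "Customer Experience Enhancement").items
  else
    (d.insert "cluster" "Product & Brand Positioning").items

def cluster_gaps (gaps : List (List (String × String))) : List (List (String × String)) :=
  gaps.map pvClusterA

-- ===== PORT B =====
def pvRules : List (List String × String) :=
  [ (["price", "cost"], "Pricing Strategy Optimization"),
    (["promo", "discount"], "Aggressive Promotion Campaign"),
    (["deliver", "convenience", "geo"], "Local Convenience Dominance"),
    (["ux", "service"], "Customer Experience Enhancement") ]

def pvDefault : String := "Product & Brand Positioning"

-- one sweep of a single rule over the (dict, combined) states
def pvSweep (r : List String × String)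
    (xs : List (PySem.Dict String String × String)) :
    List (PySem.Dict String String × String) :=
  xs.map (fun x =>
    if r.1.any (fun kw => PySem.Str.isIn kw x.2) then
      (x.1.insert "cluster" r.2, x.2)
    else x)

def cluster_gaps_alt (gaps : List (List (String × String))) : List (List (String × String)) :=
  let combos := gaps.map (fun gap =>
    let d := PySem.Dict.mk gap
    PySem.Str.lower (d.getD "category" "") ++ " "
      ++ PySem.Str.lower (d.getD "opportunity_type" ""))
  let xs := (gaps.zip combos).map
    (fun gc => ((PySem.Dict.mk gc.1).insert "cluster" pvDefault, gc.2))
  let xs := pvRules.reverse.foldl (fun acc r => pvSweep r acc) xs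
  xs.map (fun x => x.1.items)

-- ===== PRECONDITION & SPEC =====
def Spec_cluster_gaps (gaps : List (List (String × String))) (out : List (List (String × String))) : Prop := out = cluster_gaps_alt gaps
instance (gaps : List (List (String × String))) (out : List (List (String × String))) : Decidable (Spec_cluster_gaps gaps out) := by unfold Spec_cluster_gaps; infer_instance

-- ===== CLAIM (what is proved, stated in full; the proofs are below) =====
def Claim_equal_cluster_gaps : Prop := ∀ (gaps : List (List (String × String))), Dom_cluster_gaps gaps → Spec_cluster_gaps gaps (cluster_gaps gaps)

-- ===== LEMMAS AND PROOFS =====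

-- the rule-by-rule sweeps commute with the per-element map
theorem sweeps_eq_map (rs : List (List String × String))
    (xs : List (PySem.Dict String String × String)) :
    rs.foldl (fun acc r => pvSweep r acc) xs
      = xs.map (fun x => rs.foldl
          (fun x r =>
            if r.1.any (fun kw => PySem.Str.isIn kw x.2) then
              (x.1.insert "cluster" r.2, x.2)
            else x) x) := by
  induction rs generalizing xs with
  | nil => simp
  | cons r rs ih =>
    rw [List.foldl_cons, ih]
    simp only [pvSweep, List.map_map]
    rfl

theorem pvCluster_eq (gap : List (String × String)) :
    pvClusterA gap
      = (pvRules.reverse.foldl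
          (fun x r =>
            if r.1.any (fun kw => PySem.Str.isIn kw x.2) then
              (x.1.insert "cluster" r.2, x.2)
            else x)
          ((PySem.Dict.mk gap).insert "cluster" pvDefault,
            PySem.Str.lower ((PySem.Dict.mk gap).getD "category" "") ++ " "
              ++ PySem.Str.lower ((PySem.Dict.mk gap).getD "opportunity_type" ""))).1.items := by
  unfold pvClusterA pvRules pvDefault
  simp only [List.reverse, List.reverseAux, List.foldl_cons, List.foldl_nil, List.any]
  split_ifs <;> simp_all [PySem.Dict.insert_insert_self]

theorem zip_map_self {α β γ : Type} (f : α → β) (g : α × β → γ) (l : List α) :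
    (l.zip (l.map f)).map g = l.map (fun a => g (a, f a)) := by
  induction l <;> simp_all

-- ===== VERDICT (by name: the statement is the Claim_ definition above) =====
theorem cluster_gaps_spec : Claim_equal_cluster_gaps := by
  intro gaps _
  unfold Spec_cluster_gaps cluster_gaps cluster_gaps_alt
  simp only [sweeps_eq_map, List.map_map, zip_map_self]
  refine List.map_congr_left fun gap _ => ?_
  simp only [Function.comp_apply]
  exact pvCluster_eq gap
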